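-- pv_equiv track=rewrite | github.com/coelhofb/mtg_openai | magic_open_ai.py | adjust_ability
-- ===== SOURCE A (Python) =====
-- def adjust_ability(ability):
--
--    adjusted_ability = []
--    for ability_line in ability:
--       ability_line=ability_line.replace("{"+"T"+"}",'<span><img class="mana_text" src= "../static/img/T_mana.png"></span>')
--       ability_line=ability_line.replace("{"+"R"+"}",'<span"><img class="mana_text" src= "../static/img/R_mana.png"></span>')
--       ability_line=ability_line.replace("{"+"B"+"}",'<span"><img class="mana_text" src= "../static/img/B_mana.png"></span>')
--       ability_line=ability_line.replace("{"+"U"+"}",'<span"><img class="mana_text" src= "../static/img/U_mana.png"></span>')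
--       ability_line=ability_line.replace("{"+"W"+"}",'<span"><img class="mana_text" src= "../static/img/W_mana.png"></span>')
--       ability_line=ability_line.replace("{"+"G"+"}",'<span"><img class="mana_text" src= "../static/img/G_mana.png"></span>')
--       ability_line=ability_line.replace("{"+"C"+"}",'<span"><img class="mana_text" src= "../static/img/1_mana.png"></span>')
--
--       for i in range(10):
--         s = str(i)
--         ability_line=ability_line.replace("{"+s+"}",'<span"><img class="mana_text" src= "../static/img/'+s+'_mana.png"></span>')
--       adjusted_ability.append(ability_line)
--    return adjusted_ability
-- ===== SOURCE B (Python) =====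
-- MANA = {c: '<span"><img class="mana_text" src= "../static/img/' + c + '_mana.png"></span>'
--         for c in "RBUWG0123456789"}
-- MANA["T"] = '<span><img class="mana_text" src= "../static/img/T_mana.png"></span>'
-- MANA["C"] = '<span"><img class="mana_text" src= "../static/img/1_mana.png"></span>'
--
--
-- def adjust_ability(ability):
--     out = []
--     for line in ability:
--         res = []
--         i = 0
--         n = len(line)
--         while i < n:
--             if line[i] == "{" and i + 2 < n and line[i + 2] == "}" and line[i + 1] in MANA:
--                 res.append(MANA[line[i + 1]])
--                 i += 3
--             else:
--                 res.append(line[i])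
--                 i += 1
--         out.append("".join(res))
--     return out
-- ===== Notes on version B (the rewrite author's own statement) =====
-- stated objective: faster
-- what changed: A rewrites each line seventeen times with one full-string str.replace per mana token; B builds one token-to-HTML dict and replaces all tokens in a single left-to-right scan of each line.
import Mathlib
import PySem

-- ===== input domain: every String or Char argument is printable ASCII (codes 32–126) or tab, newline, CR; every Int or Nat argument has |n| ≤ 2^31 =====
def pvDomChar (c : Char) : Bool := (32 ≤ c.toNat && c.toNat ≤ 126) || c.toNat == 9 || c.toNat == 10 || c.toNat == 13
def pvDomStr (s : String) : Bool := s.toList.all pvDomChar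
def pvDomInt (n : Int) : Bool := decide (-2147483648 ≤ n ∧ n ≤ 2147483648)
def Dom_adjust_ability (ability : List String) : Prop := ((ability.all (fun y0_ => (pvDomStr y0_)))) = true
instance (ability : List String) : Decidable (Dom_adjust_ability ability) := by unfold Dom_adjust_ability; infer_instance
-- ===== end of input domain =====

-- B replaces A's seventeen whole-line .replace passes per line by one table-driven
-- left-to-right scan of each line; same return value for every input.

-- ===== PORT A =====
def adjust_ability (ability : List String) : List String :=
  ability.foldl (fun adjusted_ability ability_line =>
    let l1 := PySem.Str.replace ability_line ("{" ++ "T" ++ "}") "<span><img class=\"mana_text\" src= \"../static/img/T_mana.png\"></span>"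
    let l2 := PySem.Str.replace l1 ("{" ++ "R" ++ "}") "<span\"><img class=\"mana_text\" src= \"../static/img/R_mana.png\"></span>"
    let l3 := PySem.Str.replace l2 ("{" ++ "B" ++ "}") "<span\"><img class=\"mana_text\" src= \"../static/img/B_mana.png\"></span>"
    let l4 := PySem.Str.replace l3 ("{" ++ "U" ++ "}") "<span\"><img class=\"mana_text\" src= \"../static/img/U_mana.png\"></span>"
    let l5 := PySem.Str.replace l4 ("{" ++ "W" ++ "}") "<span\"><img class=\"mana_text\" src= \"../static/img/W_mana.png\"></span>"
    let l6 := PySem.Str.replace l5 ("{" ++ "G" ++ "}") "<span\"><img class=\"mana_text\" src= \"../static/img/G_mana.png\"></span>"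
    let l7 := PySem.Str.replace l6 ("{" ++ "C" ++ "}") "<span\"><img class=\"mana_text\" src= \"../static/img/1_mana.png\"></span>"
    let l8 := (PySem.List.pyRange 0 10 1).foldl (fun ln i =>
        let s := PySem.Int.toStr i
        PySem.Str.replace ln ("{" ++ s ++ "}")
          ("<span\"><img class=\"mana_text\" src= \"../static/img/" ++ s ++ "_mana.png\"></span>")) l7
    adjusted_ability ++ [l8]) []

-- ===== PORT B =====
-- Source B's MANA dict: a comprehension over "RBUWG0123456789", then the 'T' and 'C' entries.
def pvManaBody (c : Char) : String :=
  "<span\"><img class=\"mana_text\" src= \"../static/img/" ++ String.ofList [c] ++ "_mana.png\"></span>"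

def pvMANA : PySem.Dict Char String :=
  PySem.Dict.insert
    (PySem.Dict.insert
      ("RBUWG0123456789".toList.foldl (fun d c => PySem.Dict.insert d c (pvManaBody c)) PySem.Dict.empty)
      'T' "<span><img class=\"mana_text\" src= \"../static/img/T_mana.png\"></span>")
    'C' "<span\"><img class=\"mana_text\" src= \"../static/img/1_mana.png\"></span>"

-- Source B's while loop over one line: emit the image tag for a mapped token {c}, else copy one char.
def pvScan : List Char → List Char
  | [] => []
  | '{' :: c2 :: '}' :: t2 =>
    match pvMANA.get? c2 with
    | some r => r.toList ++ pvScan t2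
    | none => '{' :: pvScan (c2 :: '}' :: t2)
  | c :: t => c :: pvScan t
  termination_by cs => cs.length
  decreasing_by all_goals (simp only [List.length_cons]; omega)

def adjust_ability_alt (ability : List String) : List String :=
  ability.map (fun line => String.ofList (pvScan line.toList))

-- ===== PRECONDITION & SPEC =====
def Spec_adjust_ability (ability : List String) (out : List String) : Prop := out = adjust_ability_alt ability
instance (ability : List String) (out : List String) : Decidable (Spec_adjust_ability ability out) := by unfold Spec_adjust_ability; infer_instance

-- ===== CLAIM (what is proved, stated in full; the proofs are below) =====
def Claim_equal_adjust_ability : Prop := ∀ (ability : List String), Dom_adjust_ability ability → Spec_adjust_ability ability (adjust_ability ability)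

-- ===== LEMMAS AND PROOFS =====

-- One pass of Python's s.replace("{m}", r), written structurally over the characters.
def rep1 (m : Char) (r : List Char) : List Char → List Char
  | [] => []
  | '{' :: c2 :: '}' :: t2 => if c2 = m then r ++ rep1 m r t2 else '{' :: rep1 m r (c2 :: '}' :: t2)
  | c :: t => c :: rep1 m r t
  termination_by cs => cs.length
  decreasing_by all_goals (simp only [List.length_cons]; omega)

def rbody (c : Char) : List Char :=
  "<span\"><img class=\"mana_text\" src= \"../static/img/".toList ++ [c] ++ "_mana.png\"></span>".toList

-- A's seventeen (token char, replacement) pairs, in A's order of application.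
def pairsA : List (Char × List Char) :=
  ('T', "<span><img class=\"mana_text\" src= \"../static/img/T_mana.png\"></span>".toList) ::
  ('R', rbody 'R') :: ('B', rbody 'B') :: ('U', rbody 'U') :: ('W', rbody 'W') ::
  ('G', rbody 'G') :: ('C', rbody '1') ::
  ("0123456789".toList.map (fun c => (c, rbody c)))

def lookP : List (Char × List Char) → Char → Option (List Char)
  | [], _ => none
  | (m, r) :: ps, c => if c = m then some r else lookP ps c

def chain (ps : List (Char × List Char)) (cs : List Char) : List Char :=
  ps.foldl (fun s p => rep1 p.1 p.2 s) cs

-- t does not start with a recognised token body "c}" (after a '{' already seen)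
def NoTok (t : List Char) : Prop :=
  ∀ c2 t2, t = c2 :: '}' :: t2 → lookP pairsA c2 = none

def GoodKR (ps : List (Char × List Char)) : Prop :=
  ∀ p ∈ ps, lookP pairsA p.1 ≠ none ∧ p.2.take 2 = ['<', 's'] ∧ p.1 ≠ '{' ∧ '{' ∉ p.2

theorem goodKR_pairsA : GoodKR pairsA := by unfold GoodKR; decide

theorem goodKR_tail {p ps} (h : GoodKR (p :: ps)) : GoodKR ps :=
  fun q hq => h q (List.mem_cons_of_mem _ hq)

theorem rep1_nil (m r) : rep1 m r [] = [] := by simp [rep1]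

theorem rep1_tok (m r c2 t) : rep1 m r ('{' :: c2 :: '}' :: t) =
    if c2 = m then r ++ rep1 m r t else '{' :: rep1 m r (c2 :: '}' :: t) := by
  rw [rep1]

theorem rep1_cons_ne (m r c t) (h : c ≠ '{') : rep1 m r (c :: t) = c :: rep1 m r t := by
  rw [rep1.eq_def]
  cases t with
  | nil => simp [h]
  | cons d u => cases u with
    | nil => simp [h]
    | cons e v => simp [h]

theorem rep1_cons_cases (m : Char) (r : List Char) (c : Char) (t : List Char) :
    rep1 m r (c :: t) = c :: rep1 m r t ∨
      (c = '{' ∧ ∃ t2, t = m :: '}' :: t2 ∧ rep1 m r (c :: t) = r ++ rep1 m r t2) := by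
  by_cases hc : c = '{'
  · subst hc
    cases t with
    | nil => left; rw [rep1.eq_def]; simp
    | cons d u =>
      cases u with
      | nil => left; rw [rep1.eq_def]; simp
      | cons e v =>
        by_cases he : e = '}'
        · subst he
          by_cases hd : d = m
          · subst hd
            right
            exact ⟨rfl, v, rfl, by rw [rep1_tok]; simp⟩
          · left; rw [rep1_tok, if_neg hd]
        · left; rw [rep1.eq_def]; simp [he]
  · left; exact rep1_cons_ne m r c t hc

theorem rep1_cons_of_not_prefix (m : Char) (r : List Char) (c : Char) (t : List Char)
    (h : ¬ (List.isPrefixOf ['{', m, '}'] (c :: t) = true)) :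
    rep1 m r (c :: t) = c :: rep1 m r t := by
  rcases rep1_cons_cases m r c t with hc | ⟨hc, t2, ht, _⟩
  · exact hc
  · exfalso
    subst hc; subst ht
    simp [List.isPrefixOf] at h

theorem go_eq (m : Char) (r : List Char) :
    ∀ (fuel : ℕ) (l acc : List Char), l.length ≤ fuel →
      PySem.Chars.replace.go ['{', m, '}'] r fuel l acc = acc.reverse ++ rep1 m r l := by
  intro fuel
  induction fuel with
  | zero =>
    intro l acc h
    have hl : l = [] := by cases l <;> simp_all
    subst hl
    simp [PySem.Chars.replace.go, rep1_nil]
  | succ n ih =>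
    intro l acc h
    cases l with
    | nil => simp [PySem.Chars.replace.go, rep1_nil]
    | cons c t =>
      by_cases hp : List.isPrefixOf ['{', m, '}'] (c :: t) = true
      · have hpre : ['{', m, '}'] <+: (c :: t) := by
          exact List.isPrefixOf_iff_prefix.mp hp
        obtain ⟨u, hu⟩ := hpre
        have hc : c = '{' ∧ t = m :: '}' :: u := by
          simp at hu
          exact ⟨hu.1.symm, hu.2.symm⟩
        obtain ⟨hc1, hc2⟩ := hc
        subst hc1; subst hc2
        rw [PySem.Chars.replace.go]
        rw [if_pos hp]
        have hlen : u.length ≤ n := by simp at h; omega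
        rw [show List.drop (['{', m, '}'].length) ('{' :: m :: '}' :: u) = u from rfl]
        rw [ih _ _ hlen]
        rw [rep1_tok, if_pos rfl]
        simp
      · rw [PySem.Chars.replace.go]
        rw [if_neg hp]
        have hlen : t.length ≤ n := by simp at h; omega
        rw [ih _ _ hlen]
        rw [rep1_cons_of_not_prefix m r c t hp]
        simp

theorem replace_eq_rep1 (m : Char) (r cs : List Char) :
    PySem.Chars.replace cs ['{', m, '}'] r = rep1 m r cs := by
  rw [PySem.Chars.replace]
  rw [if_neg (by simp)]
  rw [go_eq m r cs.length cs [] le_rfl]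
  simp

theorem str_replace_eq (s o r : String) (m : Char) (ho : o.toList = ['{', m, '}']) :
    (PySem.Str.replace s o r).toList = rep1 m r.toList s.toList := by
  rw [PySem.Str.toList_replace, ho, replace_eq_rep1]

theorem rep1_append_left (m : Char) (r u v : List Char) (hu : '{' ∉ u) :
    rep1 m r (u ++ v) = u ++ rep1 m r v := by
  induction u with
  | nil => simp
  | cons x xs ih =>
    have hx : x ≠ '{' := fun h => hu (h ▸ List.mem_cons_self)
    rw [List.cons_append, rep1_cons_ne m r x (xs ++ v) hx,
      ih (fun h => hu (List.mem_cons_of_mem _ h))]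
    rfl

theorem chain_cons_unfold (p : Char × List Char) (ps : List (Char × List Char)) (cs : List Char) :
    chain (p :: ps) cs = chain ps (rep1 p.1 p.2 cs) := rfl

theorem chain_nil_input : ∀ ps, chain ps [] = [] := by
  intro ps
  induction ps with
  | nil => rfl
  | cons p ps ih => rw [chain_cons_unfold, rep1_nil]; exact ih

theorem chain_append_left (u : List Char) (hu : '{' ∉ u) :
    ∀ ps v, chain ps (u ++ v) = u ++ chain ps v := by
  intro ps
  induction ps with
  | nil => intro v; rfl
  | cons p ps ih =>
    intro v
    rw [chain_cons_unfold, rep1_append_left p.1 p.2 u v hu, ih, chain_cons_unfold]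

theorem take2_dest {r : List Char} (hr : r.take 2 = ['<', 's']) :
    ∃ r', r = '<' :: 's' :: r' := by
  cases r with
  | nil => simp at hr
  | cons a r1 =>
    cases r1 with
    | nil => simp at hr
    | cons b r2 =>
      simp at hr
      exact ⟨r2, by rw [hr.1, hr.2]⟩

theorem lookP_lt : lookP pairsA '<' = none := by decide

theorem noTok_rep1 (m : Char) (r t : List Char) (hr : r.take 2 = ['<', 's'])
    (h : NoTok t) : NoTok (rep1 m r t) := by
  obtain ⟨r', hr'⟩ := take2_dest hr
  intro c2 t2 he
  cases t with
  | nil => rw [rep1_nil] at he; cases he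
  | cons d u =>
    rcases rep1_cons_cases m r d u with hcase | ⟨hd, t3, hu, hcase⟩
    · rw [hcase] at he
      have hde : d = c2 ∧ rep1 m r u = '}' :: t2 := by
        constructor
        · exact (List.cons.injEq _ _ _ _ ▸ he).1
        · exact (List.cons.injEq _ _ _ _ ▸ he).2
      obtain ⟨hde1, hde2⟩ := hde
      subst hde1
      cases u with
      | nil => rw [rep1_nil] at hde2; cases hde2
      | cons e v =>
        rcases rep1_cons_cases m r e v with hc2 | ⟨he2, t4, hv, hc2⟩
        · rw [hc2] at hde2
          have heq : e = '}' := (List.cons.injEq _ _ _ _ ▸ hde2).1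
          subst heq
          exact h d v rfl
        · rw [hc2, hr'] at hde2
          cases hde2
    · rw [hcase, hr'] at he
      have : c2 = '<' := ((List.cons.injEq _ _ _ _ ▸ he).1).symm
      rw [this]
      exact lookP_lt

theorem chain_cons_noTok :
    ∀ ps, GoodKR ps → ∀ x t, (x = '{' → NoTok t) →
      chain ps (x :: t) = x :: chain ps t := by
  intro ps
  induction ps with
  | nil => intro _ x t _; rfl
  | cons p ps ih =>
    intro hg x t hx
    obtain ⟨hk, hr, _, _⟩ := hg p (List.mem_cons_self)
    rcases rep1_cons_cases p.1 p.2 x t with hc | ⟨hx', t3, ht, _⟩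
    · rw [chain_cons_unfold, hc,
        ih (goodKR_tail hg) x (rep1 p.1 p.2 t)
          (fun hxe => noTok_rep1 p.1 p.2 t hr (hx hxe)),
        chain_cons_unfold]
    · exfalso
      exact hk (hx hx' p.1 t3 ht)

theorem lookP_some_key : ∀ (ps : List (Char × List Char)) (c : Char) (r : List Char),
    lookP ps c = some r → ∃ p ∈ ps, p.1 = c := by
  intro ps
  induction ps with
  | nil => intro c r h; cases h
  | cons p ps ih =>
    intro c r h
    obtain ⟨m, rr⟩ := p
    by_cases hc : c = m
    · exact ⟨(m, rr), List.mem_cons_self, hc.symm⟩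
    · rw [lookP, if_neg hc] at h
      obtain ⟨q, hq, hq1⟩ := ih c r h
      exact ⟨q, List.mem_cons_of_mem _ hq, hq1⟩

theorem chain_tok :
    ∀ ps c2 r t, (∀ p ∈ ps, p.1 ≠ '{' ∧ '{' ∉ p.2) → lookP ps c2 = some r →
      chain ps ('{' :: c2 :: '}' :: t) = r ++ chain ps t := by
  intro ps
  induction ps with
  | nil => intro c2 r t _ h; cases h
  | cons p ps ih =>
    intro c2 r t hg hl
    obtain ⟨m0, r0⟩ := p
    obtain ⟨_, hbr0⟩ := hg (m0, r0) (List.mem_cons_self)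
    by_cases hc : c2 = m0
    · subst hc
      rw [lookP, if_pos rfl] at hl
      have hrr : r = r0 := (Option.some.injEq _ _ ▸ hl).symm
      subst hrr
      rw [chain_cons_unfold]
      show chain ps (rep1 c2 r ('{' :: c2 :: '}' :: t)) = _
      rw [rep1_tok, if_pos rfl, chain_append_left r hbr0, chain_cons_unfold]
    · rw [lookP, if_neg hc] at hl
      have hc2 : c2 ≠ '{' := by
        obtain ⟨q, hq, hq1⟩ := lookP_some_key ps c2 r hl
        have := (hg q (List.mem_cons_of_mem _ hq)).1
        rw [hq1] at this
        exact fun h => this h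
      rw [chain_cons_unfold]
      show chain ps (rep1 m0 r0 ('{' :: c2 :: '}' :: t)) = _
      rw [rep1_tok, if_neg hc, rep1_cons_ne m0 r0 c2 _ hc2,
        rep1_cons_ne m0 r0 '}' _ (by decide)]
      rw [ih c2 r (rep1 m0 r0 t) (fun q hq => hg q (List.mem_cons_of_mem _ hq)) hl]
      rfl

theorem hget (c : Char) : (pvMANA.get? c).map String.toList = lookP pairsA c := by
  have hM : pvMANA = PySem.Dict.mk [('R', "<span\"><img class=\"mana_text\" src= \"../static/img/R_mana.png\"></span>"),
    ('B', "<span\"><img class=\"mana_text\" src= \"../static/img/B_mana.png\"></span>"),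
    ('U', "<span\"><img class=\"mana_text\" src= \"../static/img/U_mana.png\"></span>"),
    ('W', "<span\"><img class=\"mana_text\" src= \"../static/img/W_mana.png\"></span>"),
    ('G', "<span\"><img class=\"mana_text\" src= \"../static/img/G_mana.png\"></span>"),
    ('0', "<span\"><img class=\"mana_text\" src= \"../static/img/0_mana.png\"></span>"),
    ('1', "<span\"><img class=\"mana_text\" src= \"../static/img/1_mana.png\"></span>"),
    ('2', "<span\"><img class=\"mana_text\" src= \"../static/img/2_mana.png\"></span>"),
    ('3', "<span\"><img class=\"mana_text\" src= \"../static/img/3_mana.png\"></span>"),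
    ('4', "<span\"><img class=\"mana_text\" src= \"../static/img/4_mana.png\"></span>"),
    ('5', "<span\"><img class=\"mana_text\" src= \"../static/img/5_mana.png\"></span>"),
    ('6', "<span\"><img class=\"mana_text\" src= \"../static/img/6_mana.png\"></span>"),
    ('7', "<span\"><img class=\"mana_text\" src= \"../static/img/7_mana.png\"></span>"),
    ('8', "<span\"><img class=\"mana_text\" src= \"../static/img/8_mana.png\"></span>"),
    ('9', "<span\"><img class=\"mana_text\" src= \"../static/img/9_mana.png\"></span>"),
    ('T', "<span><img class=\"mana_text\" src= \"../static/img/T_mana.png\"></span>"),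
    ('C', "<span\"><img class=\"mana_text\" src= \"../static/img/1_mana.png\"></span>")] := by decide
  rw [hM]
  by_cases h0 : c = 'T'
  · subst h0; decide
  by_cases h1 : c = 'R'
  · subst h1; decide
  by_cases h2 : c = 'B'
  · subst h2; decide
  by_cases h3 : c = 'U'
  · subst h3; decide
  by_cases h4 : c = 'W'
  · subst h4; decide
  by_cases h5 : c = 'G'
  · subst h5; decide
  by_cases h6 : c = 'C'
  · subst h6; decide
  by_cases h7 : c = '0'
  · subst h7; decide
  by_cases h8 : c = '1'
  · subst h8; decide
  by_cases h9 : c = '2'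
  · subst h9; decide
  by_cases h10 : c = '3'
  · subst h10; decide
  by_cases h11 : c = '4'
  · subst h11; decide
  by_cases h12 : c = '5'
  · subst h12; decide
  by_cases h13 : c = '6'
  · subst h13; decide
  by_cases h14 : c = '7'
  · subst h14; decide
  by_cases h15 : c = '8'
  · subst h15; decide
  by_cases h16 : c = '9'
  · subst h16; decide
  simp [pairsA, lookP, PySem.Dict.get?, PySem.Dict.get?_mk_cons, h0, h1, h2, h3, h4,
    h5, h6, h7, h8, h9, h10, h11, h12, h13, h14, h15, h16, Ne.symm h0, Ne.symm h1,
    Ne.symm h2, Ne.symm h3, Ne.symm h4, Ne.symm h5, Ne.symm h6, Ne.symm h7, Ne.symm h8,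
    Ne.symm h9, Ne.symm h10, Ne.symm h11, Ne.symm h12, Ne.symm h13, Ne.symm h14,
    Ne.symm h15, Ne.symm h16]

theorem pvScan_cons_ne (c : Char) (t : List Char) (h : c ≠ '{') :
    pvScan (c :: t) = c :: pvScan t := by
  rw [pvScan.eq_def]
  cases t with
  | nil => simp [h]
  | cons d u => cases u with
    | nil => simp [h]
    | cons e v => simp [h]

theorem pvScan_nil : pvScan [] = [] := by rw [pvScan.eq_def]

theorem pvScan_one (c : Char) : pvScan [c] = [c] := by
  rw [pvScan.eq_def]; simp [pvScan_nil]

theorem pvScan_two (c d : Char) : pvScan [c, d] = c :: pvScan [d] := by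
  rw [pvScan.eq_def]; split <;> simp_all

theorem pvScan_tok_some {c2 : Char} {R : String} (t2 : List Char)
    (hg : pvMANA.get? c2 = some R) :
    pvScan ('{' :: c2 :: '}' :: t2) = R.toList ++ pvScan t2 := by
  rw [pvScan.eq_def]; simp [hg]

theorem pvScan_tok_none {c2 : Char} (t2 : List Char) (hg : pvMANA.get? c2 = none) :
    pvScan ('{' :: c2 :: '}' :: t2) = '{' :: pvScan (c2 :: '}' :: t2) := by
  rw [pvScan.eq_def]; simp [hg]

theorem pvScan_mid (d e : Char) (v : List Char) (he : e ≠ '}') :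
    pvScan ('{' :: d :: e :: v) = '{' :: pvScan (d :: e :: v) := by
  rw [pvScan.eq_def]; simp [he]

theorem chain_eq_scan : ∀ (n : ℕ) (cs : List Char), cs.length ≤ n →
    chain pairsA cs = pvScan cs := by
  intro n
  induction n with
  | zero =>
    intro cs h
    have : cs = [] := by cases cs <;> simp_all
    subst this
    rw [chain_nil_input, pvScan_nil]
  | succ n ih =>
    intro cs hlen
    cases cs with
    | nil => rw [chain_nil_input, pvScan_nil]
    | cons c t =>
      by_cases hc : c = '{'
      · subst hc
        cases t with
        | nil =>
          rw [chain_cons_noTok pairsA goodKR_pairsA '{' [] (fun _ c2 t2 h => by cases h)]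
          rw [chain_nil_input, pvScan_one]
        | cons d u =>
          cases u with
          | nil =>
            rw [chain_cons_noTok pairsA goodKR_pairsA '{' [d] (fun _ c2 t2 h => by simp at h)]
            rw [ih [d] (by simp at hlen ⊢; omega), pvScan_two]
          | cons e v =>
            by_cases he : e = '}'
            · subst he
              cases hg : pvMANA.get? d with
              | some R =>
                have hl : lookP pairsA d = some R.toList := by
                  have := hget d
                  rw [hg] at this
                  simp at this
                  exact this.symm
                rw [chain_tok pairsA d R.toList v
                  (fun p hp => ⟨(goodKR_pairsA p hp).2.2.1, (goodKR_pairsA p hp).2.2.2⟩) hl]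
                rw [ih v (by simp at hlen ⊢; omega), pvScan_tok_some v hg]
              | none =>
                have hl : lookP pairsA d = none := by
                  have := hget d
                  rw [hg] at this
                  simp at this
                  exact this.symm
                rw [chain_cons_noTok pairsA goodKR_pairsA '{' (d :: '}' :: v)
                  (fun _ c2 t2 h => by
                    have : c2 = d := (List.cons.injEq _ _ _ _ ▸ h).1.symm
                    rw [this]; exact hl)]
                rw [ih (d :: '}' :: v) (by simp at hlen ⊢; omega), pvScan_tok_none v hg]
            · rw [chain_cons_noTok pairsA goodKR_pairsA '{' (d :: e :: v)
                (fun _ c2 t2 h => by simp at h; exact absurd h.2.1 he)]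
              rw [ih (d :: e :: v) (by simp at hlen ⊢; omega), pvScan_mid d e v he]
      · rw [chain_cons_noTok pairsA goodKR_pairsA c t (fun hxe => absurd hxe hc)]
        rw [ih t (by simp at hlen ⊢; omega)]
        rw [pvScan_cons_ne c t hc]

-- A's per-line computation, named so it can be reasoned about.
def lineA (ability_line : String) : String :=
    let l1 := PySem.Str.replace ability_line ("{" ++ "T" ++ "}") "<span><img class=\"mana_text\" src= \"../static/img/T_mana.png\"></span>"
    let l2 := PySem.Str.replace l1 ("{" ++ "R" ++ "}") "<span\"><img class=\"mana_text\" src= \"../static/img/R_mana.png\"></span>"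
    let l3 := PySem.Str.replace l2 ("{" ++ "B" ++ "}") "<span\"><img class=\"mana_text\" src= \"../static/img/B_mana.png\"></span>"
    let l4 := PySem.Str.replace l3 ("{" ++ "U" ++ "}") "<span\"><img class=\"mana_text\" src= \"../static/img/U_mana.png\"></span>"
    let l5 := PySem.Str.replace l4 ("{" ++ "W" ++ "}") "<span\"><img class=\"mana_text\" src= \"../static/img/W_mana.png\"></span>"
    let l6 := PySem.Str.replace l5 ("{" ++ "G" ++ "}") "<span\"><img class=\"mana_text\" src= \"../static/img/G_mana.png\"></span>"
    let l7 := PySem.Str.replace l6 ("{" ++ "C" ++ "}") "<span\"><img class=\"mana_text\" src= \"../static/img/1_mana.png\"></span>"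
    (PySem.List.pyRange 0 10 1).foldl (fun ln i =>
        let s := PySem.Int.toStr i
        PySem.Str.replace ln ("{" ++ s ++ "}")
          ("<span\"><img class=\"mana_text\" src= \"../static/img/" ++ s ++ "_mana.png\"></span>")) l7

theorem foldl_append_map {α β : Type} (f : α → β) :
    ∀ (l : List α) (acc : List β), l.foldl (fun a x => a ++ [f x]) acc = acc ++ l.map f := by
  intro l
  induction l with
  | nil => intro acc; simp
  | cons x xs ih => intro acc; simp [List.foldl, ih]

theorem lineA_eq (s : String) : lineA s = String.ofList (pvScan s.toList) := by
  apply String.ext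
  rw [String.toList_ofList]
  rw [← chain_eq_scan s.toList.length s.toList le_rfl]
  unfold lineA
  rw [show PySem.List.pyRange 0 10 1 = [0,1,2,3,4,5,6,7,8,9] from by decide]
  simp only [List.foldl]
  rw [str_replace_eq _ _ _ '9' (by rfl)]
  rw [str_replace_eq _ _ _ '8' (by rfl)]
  rw [str_replace_eq _ _ _ '7' (by rfl)]
  rw [str_replace_eq _ _ _ '6' (by rfl)]
  rw [str_replace_eq _ _ _ '5' (by rfl)]
  rw [str_replace_eq _ _ _ '4' (by rfl)]
  rw [str_replace_eq _ _ _ '3' (by rfl)]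
  rw [str_replace_eq _ _ _ '2' (by rfl)]
  rw [str_replace_eq _ _ _ '1' (by rfl)]
  rw [str_replace_eq _ _ _ '0' (by rfl)]
  rw [str_replace_eq _ _ _ 'C' (by rfl)]
  rw [str_replace_eq _ _ _ 'G' (by rfl)]
  rw [str_replace_eq _ _ _ 'W' (by rfl)]
  rw [str_replace_eq _ _ _ 'U' (by rfl)]
  rw [str_replace_eq _ _ _ 'B' (by rfl)]
  rw [str_replace_eq _ _ _ 'R' (by rfl)]
  rw [str_replace_eq _ _ _ 'T' (by rfl)]
  rfl

theorem adjust_ability_spec : Claim_equal_adjust_ability := by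
  intro ability _
  unfold Spec_adjust_ability adjust_ability_alt
  have h1 : adjust_ability ability = ability.foldl (fun acc l => acc ++ [lineA l]) [] := rfl
  rw [h1, foldl_append_map]
  simp only [List.nil_append]
  exact List.map_congr_left (fun l _ => lineA_eq l)
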